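-- pv_equiv track=rewrite | github.com/ufJmacca/advent2024 | day_04/code.py | search_next_direction
-- ===== SOURCE A (Python) =====
-- def is_within_bounds(x: int, y: int, grid: list[list[str]]):
--     return 0 <= x < len(grid) and 0 <= y < len(grid[0])
--
-- def search_next_direction(x: int, y:int, grid: list[list[str]], direction: tuple[int], letter: str) -> bool:
--     new_x, new_y = x + direction[0], y + direction[1]
--     if is_within_bounds(new_x, new_y, grid):
--         if grid[new_x][new_y] == letter:
--             if letter == "A":
--                 if search_next_direction(new_x, new_y, grid, direction, "S"):
--                     return True
--             elif letter == "S":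
--                 return True
--     return False
-- ===== SOURCE B (Python) =====
-- def is_within_bounds(x: int, y: int, grid: list[list[str]]):
--     return 0 <= x < len(grid) and 0 <= y < len(grid[0])
--
-- def search_next_direction(x: int, y: int, grid: list[list[str]], direction: tuple[int], letter: str) -> bool:
--     if letter == "A":
--         targets = ["A", "S"]
--     elif letter == "S":
--         targets = ["S"]
--     else:
--         return False
--     cx, cy = x, y
--     for t in targets:
--         cx += direction[0]
--         cy += direction[1]
--         if not is_within_bounds(cx, cy, grid) or grid[cx][cy] != t:
--             return False
--     return True
-- ===== Notes on version B (the rewrite author's own statement) =====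
-- stated objective: simpler
-- what changed: Replaces the recursion (A recursing into S) by first mapping the letter to its remaining target sequence and then walking it with an iterative loop over a running coordinate, returning False immediately for letters other than A/S.
import Mathlib
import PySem

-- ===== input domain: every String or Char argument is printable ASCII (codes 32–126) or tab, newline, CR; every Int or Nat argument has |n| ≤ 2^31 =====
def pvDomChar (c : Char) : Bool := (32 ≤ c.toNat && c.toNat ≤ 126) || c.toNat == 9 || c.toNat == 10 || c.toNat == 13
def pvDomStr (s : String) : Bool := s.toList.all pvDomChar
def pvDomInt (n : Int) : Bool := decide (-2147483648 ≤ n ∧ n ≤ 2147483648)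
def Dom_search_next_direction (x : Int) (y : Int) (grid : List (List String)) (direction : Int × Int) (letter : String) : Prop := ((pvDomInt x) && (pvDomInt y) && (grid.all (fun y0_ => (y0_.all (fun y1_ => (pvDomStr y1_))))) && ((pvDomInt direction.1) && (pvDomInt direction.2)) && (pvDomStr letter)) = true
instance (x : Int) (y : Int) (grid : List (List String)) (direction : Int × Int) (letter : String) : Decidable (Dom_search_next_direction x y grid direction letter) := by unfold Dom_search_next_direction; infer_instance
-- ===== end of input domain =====

-- B replaces A's recursion by mapping the letter to its remaining target sequence and
-- walking it with an iterative loop over a running coordinate (objective: simpler).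

-- ===== PORT A =====
def is_within_bounds (x : Int) (y : Int) (grid : List (List String)) : Bool :=
  (0 ≤ x && x < (grid.length : Int)) && (0 ≤ y && y < ((grid.headD []).length : Int))

-- grid[nx][ny]; guarded by is_within_bounds on every call site inside Pre_, so the
-- defaults are never reached on admitted inputs (a ragged grid that would raise in
-- Python is excluded by Pre_).
def pvCell (grid : List (List String)) (nx ny : Int) : String :=
  (PySem.List.pyGet? ((PySem.List.pyGet? grid nx).getD []) ny).getD ""

def search_next_direction (x : Int) (y : Int) (grid : List (List String)) (direction : Int × Int) (letter : String) : Bool :=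
  let new_x := x + direction.1
  let new_y := y + direction.2
  if is_within_bounds new_x new_y grid then
    if pvCell grid new_x new_y == letter then
      if _h : letter == "A" then
        search_next_direction new_x new_y grid direction "S"
      else if letter == "S" then true
      else false
    else false
  else false
termination_by (if letter == "A" then 1 else 0)
decreasing_by simp_all

-- ===== PORT B =====
-- walk the remaining targets, advancing a running coordinate each step
def snd_walk (grid : List (List String)) (direction : Int × Int) : Int → Int → List String → Bool
  | _, _, [] => true
  | cx, cy, t :: ts =>
    let nx := cx + direction.1
    let ny := cy + direction.2
    if !(is_within_bounds nx ny grid) || pvCell grid nx ny != t then false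
    else snd_walk grid direction nx ny ts

def search_next_direction_alt (x : Int) (y : Int) (grid : List (List String)) (direction : Int × Int) (letter : String) : Bool :=
  if letter == "A" then snd_walk grid direction x y ["A", "S"]
  else if letter == "S" then snd_walk grid direction x y ["S"]
  else false

-- ===== PRECONDITION & SPEC =====
-- Pre_ excludes exactly the inputs on which Python A raises IndexError: on a ragged grid
-- the bounds check (which uses len(grid[0])) can admit an index past the end of a shorter
-- row at the first accessed cell, or at the second when letter is "A" and the first cell matched.
def Pre_search_next_direction (x : Int) (y : Int) (grid : List (List String)) (direction : Int × Int) (letter : String) : Prop :=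
  let w : Int := (grid.headD []).length
  let nx1 := x + direction.1
  let ny1 := y + direction.2
  let nx2 := nx1 + direction.1
  let ny2 := ny1 + direction.2
  0 ≤ nx1 ∧ nx1 < (grid.length : Int) ∧ 0 ≤ ny1 ∧ ny1 < w →
    (ny1 < ((grid.getD nx1.toNat []).length : Int) ∧
      (letter = "A" → (grid.getD nx1.toNat []).getD ny1.toNat "" = "A" →
        0 ≤ nx2 ∧ nx2 < (grid.length : Int) ∧ 0 ≤ ny2 ∧ ny2 < w →
          ny2 < ((grid.getD nx2.toNat []).length : Int)))
instance (x : Int) (y : Int) (grid : List (List String)) (direction : Int × Int) (letter : String) : Decidable (Pre_search_next_direction x y grid direction letter) := by unfold Pre_search_next_direction; infer_instance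

def pvWitness_search_next_direction : Int × Int × List (List String) × (Int × Int) × String :=
  (0, 0, [["X", "A"], ["B", "S"]], (1, 1), "A")

def Spec_search_next_direction (x : Int) (y : Int) (grid : List (List String)) (direction : Int × Int) (letter : String) (out : Bool) : Prop := out = search_next_direction_alt x y grid direction letter
instance (x : Int) (y : Int) (grid : List (List String)) (direction : Int × Int) (letter : String) (out : Bool) : Decidable (Spec_search_next_direction x y grid direction letter out) := by unfold Spec_search_next_direction; infer_instance

-- ===== CLAIM (what is proved, stated in full; the proofs are below) =====
def Claim_equal_search_next_direction : Prop := ∀ (x : Int) (y : Int) (grid : List (List String)) (direction : Int × Int) (letter : String), Dom_search_next_direction x y grid direction letter → Pre_search_next_direction x y grid direction letter → Spec_search_next_direction x y grid direction letter (search_next_direction x y grid direction letter)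

-- ===== LEMMAS AND PROOFS =====
theorem snd_A_unfold (x y : Int) (grid : List (List String)) (direction : Int × Int) (letter : String) :
    search_next_direction x y grid direction letter =
      (if is_within_bounds (x + direction.1) (y + direction.2) grid then
        if pvCell grid (x + direction.1) (y + direction.2) == letter then
          if _h : letter == "A" then
            search_next_direction (x + direction.1) (y + direction.2) grid direction "S"
          else if letter == "S" then true
          else false
        else false
      else false) := by
  rw [search_next_direction]

-- ===== VERDICT (by name: the statement is the Claim_ definition above) =====
theorem search_next_direction_spec : Claim_equal_search_next_direction := by
  intro x y grid direction letter _ _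
  unfold Spec_search_next_direction search_next_direction_alt
  by_cases hA : letter = "A"
  · subst hA
    rw [snd_A_unfold, snd_A_unfold]
    simp [snd_walk, Bool.and_assoc]
  · by_cases hS : letter = "S"
    · subst hS
      rw [snd_A_unfold]
      simp [snd_walk]
    · rw [snd_A_unfold]
      simp [hA, hS]
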